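-- pv_equiv track=rewrite | github.com/Nielk74/xml-allure-converter | junit_xml_to_allure.py | map_properties_to_labels_links_params
-- ===== SOURCE A (Python) =====
-- from typing import Dict, List, Tuple, Optional
--
-- def map_properties_to_labels_links_params(props: Dict[str,str]) -> Tuple[List[Dict[str,str]], List[Dict[str,str]], List[Dict[str,str]]]:
--     """
--     Simple convention to enrich hierarchy/metadata from <properties>:
--       - label: "allure.label.X" => {"name":"X","value":value}
--       - link:  "allure.link.ISSUE" => {"name":"ISSUE","url":value}
--       - param: "allure.param.foo" => {"name":"foo","value":value}
--     This lets you drive epic/feature/story/etc. from plain JUnit XML.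
--     """
--     labels, links, params = [], [], []
--     for k, v in props.items():
--         if k.startswith("allure.label."):
--             labels.append({"name": k[len("allure.label.") :], "value": v})
--         elif k.startswith("allure.link."):
--             links.append({"name": k[len("allure.link.") :], "url": v})
--         elif k.startswith("allure.param."):
--             params.append({"name": k[len("allure.param.") :], "value": v})
--     return labels, links, params
-- ===== SOURCE B (Python) =====
-- TAG_SPEC = (("allure.label.", "label", "value"),
--             ("allure.link.", "link", "url"),
--             ("allure.param.", "param", "value"))
--
--
-- def map_properties_to_labels_links_params(props):
--     # Stage 1: tag every recognised property with its category, driven by a spec table.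
--     tagged = []
--     for k, v in props.items():
--         for prefix, cat, field in TAG_SPEC:
--             if k.startswith(prefix):
--                 tagged.append((cat, {"name": k[len(prefix):], field: v}))
--                 break
--     # Stage 2: select each category out of the tagged stream.
--     labels = [e for c, e in tagged if c == "label"]
--     links = [e for c, e in tagged if c == "link"]
--     params = [e for c, e in tagged if c == "param"]
--     return labels, links, params
-- ===== Notes on version B (the rewrite author's own statement) =====
-- stated objective: alternative
-- what changed: A's single loop with a hardcoded if/elif chain appending directly to three lists becomes a two-stage pipeline: a table-driven tagging pass (first-match scan over a prefix/category/field spec table) building one intermediate tagged stream, followed by per-category selection from that stream.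
import Mathlib
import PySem

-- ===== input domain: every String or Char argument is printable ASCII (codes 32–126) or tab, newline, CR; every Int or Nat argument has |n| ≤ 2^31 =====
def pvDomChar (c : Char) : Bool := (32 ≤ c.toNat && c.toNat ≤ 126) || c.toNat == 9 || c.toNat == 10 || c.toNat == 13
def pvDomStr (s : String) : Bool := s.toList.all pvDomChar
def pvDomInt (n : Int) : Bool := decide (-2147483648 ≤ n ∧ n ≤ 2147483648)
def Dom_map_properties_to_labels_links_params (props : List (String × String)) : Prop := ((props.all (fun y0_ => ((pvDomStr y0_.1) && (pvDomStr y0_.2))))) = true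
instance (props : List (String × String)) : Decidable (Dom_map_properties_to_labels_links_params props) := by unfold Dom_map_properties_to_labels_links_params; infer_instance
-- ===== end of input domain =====

-- B replaces A's single loop with a hardcoded if/elif chain by a two-stage pipeline:
-- a table-driven tagging pass builds one intermediate tagged stream (first-match scan
-- over a prefix/category/field spec table), then each category is selected out of the
-- tagged stream; objective: alternative decomposition.

-- ===== PORT A =====
-- single fold over props with the (labels, links, params) triple as accumulator,
-- branch order as in A's if/elif chain
def map_properties_to_labels_links_params (props : List (String × String)) : (List (List (String × String))) × (List (List (String × String))) × (List (List (String × String))) :=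
  props.foldl (fun acc kv =>
    if PySem.Str.startswith kv.1 "allure.label." then
      (acc.1 ++ [[("name", PySem.Str.slice kv.1 (some 13) none), ("value", kv.2)]], acc.2.1, acc.2.2)
    else if PySem.Str.startswith kv.1 "allure.link." then
      (acc.1, acc.2.1 ++ [[("name", PySem.Str.slice kv.1 (some 12) none), ("url", kv.2)]], acc.2.2)
    else if PySem.Str.startswith kv.1 "allure.param." then
      (acc.1, acc.2.1, acc.2.2 ++ [[("name", PySem.Str.slice kv.1 (some 13) none), ("value", kv.2)]])
    else acc) ([], [], [])

-- ===== PORT B =====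
-- the spec table TAG_SPEC from Source B: (prefix, category, field name)
def pvTagSpec : List (String × String × String) :=
  [("allure.label.", "label", "value"), ("allure.link.", "link", "url"), ("allure.param.", "param", "value")]

-- inner 'for prefix, cat, field in TAG_SPEC: if k.startswith(prefix): … break' = first match in the table
def pvTagOf (kv : String × String) : Option (String × List (String × String)) :=
  match pvTagSpec.find? (fun pcf => PySem.Str.startswith kv.1 pcf.1) with
  | some pcf => some (pcf.2.1, [("name", PySem.Str.slice kv.1 (some (pcf.1.toList.length : Int)) none), (pcf.2.2, kv.2)])
  | none => none

-- stage 1 (tagging loop with append) then stage 2 (three selections from the tagged stream)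
def map_properties_to_labels_links_params_alt (props : List (String × String)) : (List (List (String × String))) × (List (List (String × String))) × (List (List (String × String))) :=
  let tagged := props.filterMap pvTagOf
  ( tagged.filterMap (fun ce => if ce.1 == "label" then some ce.2 else none)
  , tagged.filterMap (fun ce => if ce.1 == "link" then some ce.2 else none)
  , tagged.filterMap (fun ce => if ce.1 == "param" then some ce.2 else none) )

-- ===== PRECONDITION & SPEC =====
def Spec_map_properties_to_labels_links_params (props : List (String × String)) (out : (List (List (String × String))) × (List (List (String × String))) × (List (List (String × String)))) : Prop := out = map_properties_to_labels_links_params_alt props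
instance (props : List (String × String)) (out : (List (List (String × String))) × (List (List (String × String))) × (List (List (String × String)))) : Decidable (Spec_map_properties_to_labels_links_params props out) := by unfold Spec_map_properties_to_labels_links_params; infer_instance

-- ===== CLAIM (what is proved, stated in full; the proofs are below) =====
def Claim_equal_map_properties_to_labels_links_params : Prop := ∀ (props : List (String × String)), Dom_map_properties_to_labels_links_params props → Spec_map_properties_to_labels_links_params props (map_properties_to_labels_links_params props)

-- ===== LEMMAS AND PROOFS =====

-- pvTagOf evaluated in each of the four branch cases
theorem pvTagOf_label (kv : String × String)
    (h1 : PySem.Str.startswith kv.1 "allure.label." = true) :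
    pvTagOf kv = some ("label", [("name", PySem.Str.slice kv.1 (some 13) none), ("value", kv.2)]) := by
  simp only [PySem.Str.startswith_eq] at h1
  simp at h1
  simp [pvTagOf, pvTagSpec, h1]

theorem pvTagOf_link (kv : String × String)
    (h1 : PySem.Str.startswith kv.1 "allure.label." = false)
    (h2 : PySem.Str.startswith kv.1 "allure.link." = true) :
    pvTagOf kv = some ("link", [("name", PySem.Str.slice kv.1 (some 12) none), ("url", kv.2)]) := by
  simp only [PySem.Str.startswith_eq] at h1 h2
  simp at h1 h2
  simp [pvTagOf, pvTagSpec, h1, h2]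

theorem pvTagOf_param (kv : String × String)
    (h1 : PySem.Str.startswith kv.1 "allure.label." = false)
    (h2 : PySem.Str.startswith kv.1 "allure.link." = false)
    (h3 : PySem.Str.startswith kv.1 "allure.param." = true) :
    pvTagOf kv = some ("param", [("name", PySem.Str.slice kv.1 (some 13) none), ("value", kv.2)]) := by
  simp only [PySem.Str.startswith_eq] at h1 h2 h3
  simp at h1 h2 h3
  simp [pvTagOf, pvTagSpec, h1, h2, h3]

theorem pvTagOf_none (kv : String × String)
    (h1 : PySem.Str.startswith kv.1 "allure.label." = false)
    (h2 : PySem.Str.startswith kv.1 "allure.link." = false)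
    (h3 : PySem.Str.startswith kv.1 "allure.param." = false) :
    pvTagOf kv = none := by
  simp only [PySem.Str.startswith_eq] at h1 h2 h3
  simp at h1 h2 h3
  simp [pvTagOf, pvTagSpec, h1, h2, h3]

-- loop invariant: A's fold starting from acc appends B's three selections
theorem pv_fold_inv (props : List (String × String))
    (acc : (List (List (String × String))) × (List (List (String × String))) × (List (List (String × String)))) :
    props.foldl (fun acc kv =>
      if PySem.Str.startswith kv.1 "allure.label." then
        (acc.1 ++ [[("name", PySem.Str.slice kv.1 (some 13) none), ("value", kv.2)]], acc.2.1, acc.2.2)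
      else if PySem.Str.startswith kv.1 "allure.link." then
        (acc.1, acc.2.1 ++ [[("name", PySem.Str.slice kv.1 (some 12) none), ("url", kv.2)]], acc.2.2)
      else if PySem.Str.startswith kv.1 "allure.param." then
        (acc.1, acc.2.1, acc.2.2 ++ [[("name", PySem.Str.slice kv.1 (some 13) none), ("value", kv.2)]])
      else acc) acc
    = (acc.1 ++ (map_properties_to_labels_links_params_alt props).1,
       acc.2.1 ++ (map_properties_to_labels_links_params_alt props).2.1,
       acc.2.2 ++ (map_properties_to_labels_links_params_alt props).2.2) := by
  induction props generalizing acc with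
  | nil => simp [map_properties_to_labels_links_params_alt]
  | cons kv rest ih =>
    simp only [List.foldl_cons, map_properties_to_labels_links_params_alt,
      List.filterMap_cons] at ih ⊢
    by_cases h1 : PySem.Str.startswith kv.1 "allure.label." = true
    · rw [pvTagOf_label kv h1]
      simp only [h1, reduceIte, List.filterMap_cons]
      rw [ih]
      simp
    · rw [Bool.not_eq_true] at h1
      by_cases h2 : PySem.Str.startswith kv.1 "allure.link." = true
      · rw [pvTagOf_link kv h1 h2]
        simp only [h1, h2, reduceIte, List.filterMap_cons]
        rw [ih]
        simp
      · rw [Bool.not_eq_true] at h2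
        by_cases h3 : PySem.Str.startswith kv.1 "allure.param." = true
        · rw [pvTagOf_param kv h1 h2 h3]
          simp only [h1, h2, h3, reduceIte, List.filterMap_cons]
          rw [ih]
          simp
        · rw [Bool.not_eq_true] at h3
          rw [pvTagOf_none kv h1 h2 h3]
          simp only [h1, h2, h3]
          rw [ih]
          simp

-- ===== VERDICT (by name: the statement is the Claim_ definition above) =====
theorem map_properties_to_labels_links_params_spec : Claim_equal_map_properties_to_labels_links_params := by
  intro props _
  unfold Spec_map_properties_to_labels_links_params map_properties_to_labels_links_params
  rw [pv_fold_inv]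
  simp
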